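-- pv_equiv track=rewrite | github.com/Luminous-Dynamics/luminous-nix | .archive-2025-08-10/old-archives/archive/legacy_backend/backend/core/response_enhancer.py | _simplify_language
-- ===== SOURCE A (Python) =====
-- def _simplify_language(text: str) -> str:
--     """Simplify language for reduced cognitive load"""
--     # Simple word replacements
--     replacements = {
--         "configure": "set up",
--         "initialize": "start",
--         "execute": "run",
--         "implement": "add",
--         "utilize": "use",
--         "parameter": "setting",
--         "repository": "source",
--     }
--
--     simplified = text
--     for complex_word, simple_word in replacements.items():
--         simplified = simplified.replace(complex_word, simple_word)
--
--     return simplified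
-- ===== SOURCE B (Python) =====
-- def _simplify_language(text: str) -> str:
--     """Simplify language for reduced cognitive load"""
--     pairs = [
--         ("configure", "set up"),
--         ("initialize", "start"),
--         ("execute", "run"),
--         ("implement", "add"),
--         ("utilize", "use"),
--         ("parameter", "setting"),
--         ("repository", "source"),
--     ]
--
--     def go(s, table):
--         if not table:
--             return s
--         complex_word, simple_word = table[0]
--         return go(simple_word.join(s.split(complex_word)), table[1:])
--
--     return go(text, pairs)
-- ===== Notes on version B (the rewrite author's own statement) =====
-- stated objective: alternative
-- what changed: Replaces the dict-driven loop of str.replace calls with a recursion over an ordered replacement table where each substitution is done by splitting the text on the key and rejoining the fragments with the simple word (new.join(s.split(old))).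
import Mathlib
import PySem

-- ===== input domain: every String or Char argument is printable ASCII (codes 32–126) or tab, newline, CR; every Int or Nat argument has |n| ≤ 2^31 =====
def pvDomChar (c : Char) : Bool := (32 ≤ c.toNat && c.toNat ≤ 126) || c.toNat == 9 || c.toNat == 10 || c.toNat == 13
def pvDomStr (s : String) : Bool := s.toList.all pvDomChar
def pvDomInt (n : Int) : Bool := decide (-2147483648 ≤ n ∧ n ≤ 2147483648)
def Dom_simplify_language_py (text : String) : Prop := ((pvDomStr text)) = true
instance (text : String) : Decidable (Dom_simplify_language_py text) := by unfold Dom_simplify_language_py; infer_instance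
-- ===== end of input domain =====

-- B substitutes each table entry by split-on-key / rejoin-with-replacement, recursing over the table,
-- instead of A's dict loop of str.replace calls; same cost, different decomposition (objective: alternative).

-- ===== PORT A =====
def simplify_language_py (text : String) : String :=
  let replacements : PySem.Dict String String :=
    ((((((PySem.Dict.empty.insert "configure" "set up").insert
        "initialize" "start").insert
        "execute" "run").insert
        "implement" "add").insert
        "utilize" "use").insert
        "parameter" "setting").insert
        "repository" "source"
  replacements.items.foldl
    (fun simplified p => PySem.Str.replace simplified p.1 p.2) text

-- ===== PORT B =====
-- B's pairs table
def pvPairs : List (String × String) :=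
  [("configure", "set up"), ("initialize", "start"), ("execute", "run"),
   ("implement", "add"), ("utilize", "use"), ("parameter", "setting"),
   ("repository", "source")]

-- simple_word.join(s.split(complex_word)); split? is none only for an empty separator,
-- which never occurs for the keys of pvPairs (Python would raise there)
def pvSubst (s old new : String) : String :=
  match PySem.Str.split? s old with
  | some parts => PySem.Str.join new parts
  | none => s

-- the inner recursion go(s, table)
def pvGo (s : String) : List (String × String) → String
  | [] => s
  | p :: rest => pvGo (pvSubst s p.1 p.2) rest

def simplify_language_py_alt (text : String) : String :=
  pvGo text pvPairs

-- ===== PRECONDITION & SPEC =====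
def Spec_simplify_language_py (text : String) (out : String) : Prop := out = simplify_language_py_alt text
instance (text : String) (out : String) : Decidable (Spec_simplify_language_py text out) := by unfold Spec_simplify_language_py; infer_instance

-- ===== CLAIM (what is proved, stated in full; the proofs are below) =====
def Claim_equal_simplify_language_py : Prop := ∀ (text : String), Dom_simplify_language_py text → Spec_simplify_language_py text (simplify_language_py text)

-- ===== LEMMAS AND PROOFS =====

-- reference recursion: what replace computes on the remaining suffix
def pvRepl (sep new : List Char) : List Char → List Char
  | [] => []
  | c :: t =>
    if sep.isPrefixOf (c :: t) then new ++ pvRepl sep new (t.drop (sep.length - 1))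
    else c :: pvRepl sep new t
termination_by l => l.length
decreasing_by
  · simp only [List.length_drop, List.length_cons]; omega
  · simp

-- reference recursion: what splitOn computes on the remaining suffix
def pvSpl (sep : List Char) : List Char → List Char → List (List Char)
  | [], cur => [cur.reverse]
  | c :: t, cur =>
    if sep.isPrefixOf (c :: t) then cur.reverse :: pvSpl sep (t.drop (sep.length - 1)) []
    else pvSpl sep t (c :: cur)
termination_by l _ => l.length
decreasing_by
  · simp only [List.length_drop, List.length_cons]; omega
  · simp

theorem pvReplace_go_eq (sep new : List Char) (hsep : sep ≠ []) :
    ∀ (fuel : Nat) (l acc : List Char), l.length ≤ fuel →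
      PySem.Chars.replace.go sep new fuel l acc = acc.reverse ++ pvRepl sep new l := by
  intro fuel
  induction fuel with
  | zero =>
      intro l acc h
      have : l = [] := List.eq_nil_of_length_eq_zero (Nat.le_zero.mp h)
      subst this
      simp [PySem.Chars.replace.go, pvRepl]
  | succ n ih =>
      intro l acc h
      match l with
      | [] => simp [PySem.Chars.replace.go, pvRepl]
      | c :: t =>
          rw [PySem.Chars.replace.go]
          by_cases hp : sep.isPrefixOf (c :: t)
          · have hdrop : List.drop sep.length (c :: t) = t.drop (sep.length - 1) := by
              cases sep with
              | nil => exact absurd rfl hsep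
              | cons a s => simp
            have hlen : (t.drop (sep.length - 1)).length ≤ n := by
              simp only [List.length_drop]
              have := h
              simp at this
              omega
            rw [if_pos hp, hdrop, ih _ _ hlen]
            simp [pvRepl, hp]
          · have hlen : t.length ≤ n := by simp at h; omega
            rw [if_neg hp, ih _ _ hlen]
            simp [pvRepl, hp]

theorem pvSplitOn_go_eq (sep : List Char) (hsep : sep ≠ []) :
    ∀ (fuel : Nat) (l cur : List Char) (acc : List (List Char)), l.length < fuel →
      PySem.Chars.splitOn.go sep fuel l cur acc = acc.reverse ++ pvSpl sep l cur := by
  intro fuel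
  induction fuel with
  | zero => intro l cur acc h; omega
  | succ n ih =>
      intro l cur acc h
      match l with
      | [] => simp [PySem.Chars.splitOn.go, pvSpl]
      | c :: t =>
          rw [PySem.Chars.splitOn.go]
          by_cases hp : sep.isPrefixOf (c :: t)
          · have hdrop : List.drop sep.length (c :: t) = t.drop (sep.length - 1) := by
              cases sep with
              | nil => exact absurd rfl hsep
              | cons a s => simp
            have hlen : (t.drop (sep.length - 1)).length < n := by
              simp only [List.length_drop]
              simp at h
              omega
            rw [if_pos hp, hdrop, ih _ _ _ hlen]
            simp [pvSpl, hp]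
          · have hlen : t.length < n := by simp at h; omega
            rw [if_neg hp, ih _ _ _ hlen]
            simp [pvSpl, hp]

theorem pvIntercalate_cons_cons (sep a b : List Char) (l : List (List Char)) :
    List.intercalate sep (a :: b :: l) = a ++ sep ++ List.intercalate sep (b :: l) := by
  simp [List.intercalate, List.intersperse]

theorem pvSpl_ne_nil (sep l cur : List Char) : pvSpl sep l cur ≠ [] := by
  fun_induction pvSpl sep l cur with
  | case1 => simp
  | case2 => simp
  | case3 _ _ _ _ ih => exact ih

theorem pvIntercalate_spl (sep new : List Char) :
    ∀ (l cur : List Char), new.intercalate (pvSpl sep l cur) = cur.reverse ++ pvRepl sep new l := by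
  intro l cur
  fun_induction pvSpl sep l cur with
  | case1 cur => simp [pvRepl, List.intercalate]
  | case2 c t cur hp ih =>
      rw [pvRepl, if_pos hp]
      cases hs : pvSpl sep (t.drop (sep.length - 1)) [] with
      | nil => exact absurd hs (pvSpl_ne_nil _ _ _)
      | cons x xs =>
          rw [hs] at ih
          rw [pvIntercalate_cons_cons, ih]
          simp
  | case3 c t cur hp ih =>
      rw [pvRepl, if_neg hp, ih]
      simp

theorem pvJoin_splitOn_eq_replace (s sep new : List Char) (hsep : sep ≠ []) :
    PySem.Chars.join new (PySem.Chars.splitOn s sep) = PySem.Chars.replace s sep new := by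
  unfold PySem.Chars.join PySem.Chars.splitOn PySem.Chars.replace
  rw [if_neg (by simpa using hsep)]
  rw [pvSplitOn_go_eq sep hsep (s.length + 1) s [] [] (Nat.lt_succ_self _)]
  rw [pvReplace_go_eq sep new hsep s.length s [] (Nat.le_refl _)]
  simpa using pvIntercalate_spl sep new s []

theorem pvSubst_eq_replace (s old new : String) (h : old.toList ≠ []) :
    pvSubst s old new = PySem.Str.replace s old new := by
  unfold pvSubst
  have hnone : PySem.Str.split? s old ≠ none := by
    intro hc
    have := PySem.Str.split?_map s old
    rw [hc] at this
    simp [PySem.Chars.split?, h] at this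
  cases hs : PySem.Str.split? s old with
  | none => exact absurd hs hnone
  | some parts =>
      apply String.toList_inj.mp
      rw [PySem.Str.toList_join, PySem.Str.toList_replace]
      have hmap := PySem.Str.split?_map s old
      rw [hs] at hmap
      simp [PySem.Chars.split?, h] at hmap
      rw [hmap]
      exact pvJoin_splitOn_eq_replace s.toList old.toList new.toList h

theorem pvGo_eq_foldl (ps : List (String × String)) (h : ∀ p ∈ ps, p.1.toList ≠ []) :
    ∀ s : String, pvGo s ps = ps.foldl (fun s p => PySem.Str.replace s p.1 p.2) s := by
  induction ps with
  | nil => intro s; simp [pvGo]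
  | cons p rest ih =>
      intro s
      rw [pvGo, List.foldl_cons, pvSubst_eq_replace s p.1 p.2 (h p (List.mem_cons_self))]
      exact ih (fun q hq => h q (List.mem_cons_of_mem _ hq)) _

theorem pvItems_eval :
    (((((((PySem.Dict.empty.insert "configure" "set up").insert
        "initialize" "start").insert
        "execute" "run").insert
        "implement" "add").insert
        "utilize" "use").insert
        "parameter" "setting").insert
        "repository" "source" : PySem.Dict String String).items = pvPairs := by
  decide

-- ===== VERDICT (by name: the statement is the Claim_ definition above) =====
theorem simplify_language_py_spec : Claim_equal_simplify_language_py := by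
  intro text _
  unfold Spec_simplify_language_py simplify_language_py simplify_language_py_alt
  simp only [pvItems_eval]
  exact (pvGo_eq_foldl pvPairs (by decide) text).symm
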